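-- pv_equiv track=rewrite | github.com/bradyc59/CA314 | mp/score_hand.py | isNOfAKind
-- ===== SOURCE A (Python) =====
-- def isNOfAKind(hand, count):
--     cardValueCount = dict()
--     for card in hand:
--         suit, value = card
--         cardValueCount[value] = cardValueCount.get(value, 0) + 1
--     for value in cardValueCount:
--         if cardValueCount[value] == count: return True
--     return False
-- ===== SOURCE B (Python) =====
-- def isNOfAKind(hand, count):
--     values = []
--     for card in hand:
--         suit, value = card
--         values.append(value)
--     while values:
--         v = values[0]
--         rest = [x for x in values[1:] if x != v]
--         if len(values) - len(rest) == count: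
--             return True
--         values = rest
--     return False
-- ===== Notes on version B (the rewrite author's own statement) =====
-- stated objective: alternative
-- what changed: Replaced the dict tally plus key scan with a peel-off recursion: repeatedly take the first remaining value, derive its multiplicity from the length drop after filtering it out, test it against count, and continue on the filtered remainder.
import Mathlib
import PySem

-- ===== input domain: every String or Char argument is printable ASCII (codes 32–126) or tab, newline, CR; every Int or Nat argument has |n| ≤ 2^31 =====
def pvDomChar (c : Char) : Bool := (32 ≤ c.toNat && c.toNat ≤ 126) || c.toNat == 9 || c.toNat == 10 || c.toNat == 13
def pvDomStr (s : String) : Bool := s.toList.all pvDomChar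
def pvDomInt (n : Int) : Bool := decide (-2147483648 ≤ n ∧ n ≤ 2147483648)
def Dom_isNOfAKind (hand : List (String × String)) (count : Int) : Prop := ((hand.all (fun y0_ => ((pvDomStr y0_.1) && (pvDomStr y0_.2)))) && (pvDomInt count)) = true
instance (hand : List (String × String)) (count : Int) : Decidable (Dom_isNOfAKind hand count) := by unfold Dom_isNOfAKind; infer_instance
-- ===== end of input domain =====

-- B replaces A's dict tally + key scan with a peel-off recursion on the value list (alternative decomposition, same return value).

-- ===== PORT A =====
def isNOfAKind (hand : List (String × String)) (count : Int) : Bool :=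
  -- cardValueCount = dict(); for card in hand: suit, value = card; cardValueCount[value] = cardValueCount.get(value, 0) + 1
  let d : PySem.Dict String Int :=
    hand.foldl (fun d card => d.insert card.2 (d.getD card.2 0 + 1)) PySem.Dict.empty
  -- for value in cardValueCount: if cardValueCount[value] == count: return True ; return False
  d.keys.any (fun v => d.getD v 0 == count)

-- ===== PORT B =====
-- while values: v = values[0]; rest = [x for x in values[1:] if x != v];
--   if len(values) - len(rest) == count: return True; values = rest
-- return False
def altLoop (values : List String) (count : Int) : Bool :=
  match values with
  | [] => false
  | v :: tl =>
    let rest := tl.filter (fun x => x ≠ v)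
    if ((v :: tl).length : Int) - (rest.length : Int) == count then true
    else altLoop rest count
termination_by values.length
decreasing_by
  simp only [List.length_cons, List.length_unattach]
  calc (List.filter _ tl.attach).length ≤ tl.attach.length := List.length_filter_le _ _
    _ = tl.length := tl.length_attach
    _ < tl.length + 1 := Nat.lt_succ_self _

def isNOfAKind_alt (hand : List (String × String)) (count : Int) : Bool :=
  -- values = []; for card in hand: suit, value = card; values.append(value)
  altLoop (hand.map (fun card => card.2)) count

-- ===== PRECONDITION & SPEC =====
def Spec_isNOfAKind (hand : List (String × String)) (count : Int) (out : Bool) : Prop := out = isNOfAKind_alt hand count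
instance (hand : List (String × String)) (count : Int) (out : Bool) : Decidable (Spec_isNOfAKind hand count out) := by unfold Spec_isNOfAKind; infer_instance

-- ===== CLAIM (what is proved, stated in full; the proofs are below) =====
def Claim_equal_isNOfAKind : Prop := ∀ (hand : List (String × String)) (count : Int), Dom_isNOfAKind hand count → Spec_isNOfAKind hand count (isNOfAKind hand count)

-- ===== LEMMAS AND PROOFS =====

-- A's result characterised: some value occurs exactly `count` times among the hand's values.
theorem isNOfAKind_iff (hand : List (String × String)) (count : Int) :
    isNOfAKind hand count = true ↔
      ∃ v ∈ hand.map (fun card => card.2), ((hand.map (fun card => card.2)).count v : Int) = count := by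
  unfold isNOfAKind
  have hd : hand.foldl (fun d card => d.insert card.2 (d.getD card.2 0 + 1)) PySem.Dict.empty
      = PySem.Dict.counter (hand.map (fun card => card.2)) := by
    rw [← PySem.Dict.foldl_insert_getD_add_one_eq_counter, List.foldl_map]
  simp [hd, List.any_eq_true, PySem.Dict.keys_counter, PySem.Dict.getD_counter,
    PySem.Set.mem_ofList]

-- unfolding equations for altLoop
theorem altLoop_nil (count : Int) : altLoop [] count = false := by rw [altLoop]

theorem altLoop_cons (v : String) (tl : List String) (count : Int) :
    altLoop (v :: tl) count =
      (if (((v :: tl).length : Int) - ((tl.filter (fun x => x ≠ v)).length : Int) == count) then true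
       else altLoop (tl.filter (fun x => x ≠ v)) count) := by
  rw [altLoop]

-- length bookkeeping: filtering out the head value removes exactly its multiplicity
theorem peel_length (v : String) (tl : List String) :
    (tl.filter (fun x => x ≠ v)).length + tl.count v = tl.length := by
  induction tl with
  | nil => simp
  | cons a tl ih =>
    simp only [List.filter_cons, List.count_cons] at *
    by_cases h : a = v <;> simp [h] at * <;> omega

-- the length-difference test of B is exactly "the head value's multiplicity equals count"
theorem head_count (v : String) (tl : List String) (count : Int) :
    ((((v :: tl).length : Int) - ((tl.filter (fun x => x ≠ v)).length : Int)) = count) ↔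
      (((v :: tl).count v : Int) = count) := by
  have hlen := peel_length v tl
  simp only [List.length_cons, List.count_cons_self]
  constructor <;> intro hx <;> push_cast at * <;> omega

theorem altLoop_iff_aux (n : ℕ) : ∀ (values : List String), values.length ≤ n → ∀ (count : Int),
    (altLoop values count = true ↔ ∃ v ∈ values, ((values.count v : Int) = count)) := by
  induction n with
  | zero =>
    intro values hlen count
    have : values = [] := List.length_eq_zero_iff.mp (Nat.le_zero.mp hlen)
    subst this; simp [altLoop_nil]
  | succ n ih =>
    intro values hlen count
    match values with
    | [] => simp [altLoop_nil]
    | v :: tl =>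
      rw [altLoop_cons]
      have hrest : (tl.filter (fun x => x ≠ v)).length ≤ n := by
        have h1 := List.length_filter_le (fun x => decide (x ≠ v)) tl
        simp only [List.length_cons] at hlen
        omega
      split_ifs with hcond
      · have hc : ((v :: tl).count v : Int) = count :=
          (head_count v tl count).mp (beq_iff_eq.mp hcond)
        exact iff_of_true rfl ⟨v, by simp, hc⟩
      · rw [ih _ hrest count]
        have hvne : ¬ (((v :: tl).count v : Int) = count) := fun hc =>
          hcond (beq_iff_eq.mpr ((head_count v tl count).mpr hc))
        constructor
        · rintro ⟨x, hx, hcx⟩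
          have hmem := List.mem_filter.mp hx
          have hxne : x ≠ v := by simpa using hmem.2
          refine ⟨x, List.mem_cons_of_mem _ hmem.1, ?_⟩
          rw [List.count_cons_of_ne (Ne.symm hxne)]
          rwa [List.count_filter (by simpa using hxne)] at hcx
        · rintro ⟨x, hx, hcx⟩
          rcases List.mem_cons.mp hx with rfl | hxtl
          · exact absurd hcx hvne
          · by_cases hxv : x = v
            · subst hxv; exact absurd hcx hvne
            · refine ⟨x, List.mem_filter.mpr ⟨hxtl, by simpa using hxv⟩, ?_⟩
              rw [List.count_filter (by simpa using hxv)]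
              rwa [List.count_cons_of_ne (Ne.symm hxv)] at hcx

theorem altLoop_iff (values : List String) (count : Int) :
    altLoop values count = true ↔ ∃ v ∈ values, ((values.count v : Int) = count) :=
  altLoop_iff_aux values.length values le_rfl count

-- ===== VERDICT (by name: the statement is the Claim_ definition above) =====
theorem isNOfAKind_spec : Claim_equal_isNOfAKind := by
  intro hand count _
  unfold Spec_isNOfAKind isNOfAKind_alt
  rw [Bool.eq_iff_iff, isNOfAKind_iff, altLoop_iff]
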